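-- pv_equiv track=rewrite | github.com/Aasthaengg/IBMdataset | Python_codes/p02597/s892431309.py | solve
-- ===== SOURCE A (Python) =====
-- def solve(N, S):
--     l = 0
--     r = len(S) - 1
--     answer = 0
--     while l < r:
--         if S[l] == "R":
--             l += 1
--         elif S[r] == "W":
--             r -= 1
--         else:
--             # S[l] == 'W' S[r] == 'R' l < r
--             l += 1
--             r -= 1
--             answer += 1
--
--     return answer
-- ===== SOURCE B (Python) =====
-- def solve(N, S):
--     left = [i for i, c in enumerate(S) if c != 'R']
--     right = [i for i, c in enumerate(S) if c != 'W']
--     right.reverse()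
--     return sum(1 for x, y in zip(left, right) if x < y)
-- ===== Notes on version B (the rewrite author's own statement) =====
-- stated objective: simpler
-- what changed: Replaces the two-pointer while-loop with pointer bookkeeping by two comprehension passes (indices of non-'R' chars from the left, indices of non-'W' chars from the right, reversed) zipped together, counting the pairs still out of order.
import Mathlib
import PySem

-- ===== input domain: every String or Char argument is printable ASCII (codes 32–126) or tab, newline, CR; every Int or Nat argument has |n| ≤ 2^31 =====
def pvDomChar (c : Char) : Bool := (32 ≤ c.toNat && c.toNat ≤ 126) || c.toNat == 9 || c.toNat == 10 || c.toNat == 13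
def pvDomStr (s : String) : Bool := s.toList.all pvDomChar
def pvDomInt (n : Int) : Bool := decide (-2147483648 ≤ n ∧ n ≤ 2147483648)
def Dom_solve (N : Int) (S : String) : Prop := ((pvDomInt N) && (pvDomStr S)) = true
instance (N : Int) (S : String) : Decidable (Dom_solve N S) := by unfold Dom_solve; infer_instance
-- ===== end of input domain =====

-- B replaces A's two-pointer while-loop by two index-comprehension passes (non-'R' indices from
-- the left zipped with non-'W' indices from the right) and a count; objective: simpler, same O(n) cost.

-- ===== PORT A =====
def solveLoop (S : String) (l r answer : Int) : Int :=
  if l < r then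
    if PySem.Str.pyGet? S l = some 'R' then solveLoop S (l + 1) r answer
    else if PySem.Str.pyGet? S r = some 'W' then solveLoop S l (r - 1) answer
    else solveLoop S (l + 1) (r - 1) (answer + 1)
  else answer
termination_by (r - l).toNat
decreasing_by all_goals omega

def solve (N : Int) (S : String) : Int :=
  solveLoop S 0 (PySem.Str.len S - 1) 0

-- ===== PORT B =====
def solve_alt (N : Int) (S : String) : Int :=
  let left := ((PySem.List.enumerate S.toList 0).filter (fun p => p.2 ≠ 'R')).map Prod.fst
  let right := ((PySem.List.enumerate S.toList 0).filter (fun p => p.2 ≠ 'W')).map Prod.fst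
  let right' := right.reverse
  (((left.zip right').filter (fun p => p.1 < p.2)).length : Int)

-- ===== PRECONDITION & SPEC =====
def Spec_solve (N : Int) (S : String) (out : Int) : Prop := out = solve_alt N S
instance (N : Int) (S : String) (out : Int) : Decidable (Spec_solve N S out) := by unfold Spec_solve; infer_instance

-- ===== CLAIM (what is proved, stated in full; the proofs are below) =====
def Claim_equal_solve : Prop := ∀ (N : Int) (S : String), Dom_solve N S → Spec_solve N S (solve N S)

-- ===== LEMMAS AND PROOFS =====

def Lrem (cs : List Char) (l : Int) : List Int :=
  ((PySem.List.enumerate cs 0).filter (fun p => p.2 ≠ 'R' && l ≤ p.1)).map Prod.fst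
def Rrem (cs : List Char) (r : Int) : List Int :=
  ((PySem.List.enumerate cs 0).filter (fun p => p.2 ≠ 'W' && p.1 ≤ r)).map Prod.fst
def zc (xs ys : List Int) : Nat := ((xs.zip ys).filter (fun p => p.1 < p.2)).length

theorem mem_Lrem (cs : List Char) (l : Int) (x : Int) (hx : x ∈ Lrem cs l) : l ≤ x := by
  unfold Lrem at hx
  rcases List.mem_map.1 hx with ⟨p, hp, rfl⟩
  rcases List.mem_filter.1 hp with ⟨_, hcond⟩
  simp at hcond; exact hcond.2

theorem mem_Rrem (cs : List Char) (r : Int) (y : Int) (hy : y ∈ Rrem cs r) : y ≤ r := by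
  unfold Rrem at hy
  rcases List.mem_map.1 hy with ⟨p, hp, rfl⟩
  rcases List.mem_filter.1 hp with ⟨_, hcond⟩
  simp at hcond; exact hcond.2

theorem zc_nil_of (xs ys : List Int) (h : ∀ x ∈ xs, ∀ y ∈ ys, ¬ x < y) : zc xs ys = 0 := by
  unfold zc
  rw [List.filter_eq_nil_iff.2]
  · rfl
  · rintro ⟨x, y⟩ hp
    rcases List.of_mem_zip hp with ⟨hx, hy⟩
    simpa using h x hx y hy

theorem zc_cons (x y : Int) (xs ys : List Int) :
    zc (x :: xs) (y :: ys) = (if x < y then 1 else 0) + zc xs ys := by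
  simp only [zc, List.zip_cons_cons, List.filter]
  split_ifs with h <;> simp [h] <;> omega

theorem Lrem_eq (cs : List Char) (l : Nat) (hl : l ≤ cs.length) :
    Lrem cs (l : Int) =
      ((PySem.List.enumerate (cs.drop l) (l : Int)).filter (fun p => p.2 ≠ 'R')).map Prod.fst := by
  unfold Lrem
  conv_lhs => rw [← List.take_append_drop l cs]
  rw [PySem.List.enumerate_append]
  rw [List.filter_append, List.map_append]
  have h1 : ((PySem.List.enumerate (cs.take l) 0).filter (fun p => p.2 ≠ 'R' && (l : Int) ≤ p.1)) = [] := by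
    rw [List.filter_eq_nil_iff]
    intro p hp
    rcases (PySem.List.mem_enumerate_iff _ _ _).1 hp with ⟨k, hk, rfl⟩
    have hkl : k < l := lt_of_lt_of_le hk (by simpa using List.length_take_le l cs)
    simp; intro _; omega
  have hlen : ((cs.take l).length : Int) = (l : Int) := by
    simp [List.length_take, Nat.min_eq_left hl]
  rw [h1, hlen]
  have h2 : ((PySem.List.enumerate (cs.drop l) (0 + (l:Int))).filter (fun p => p.2 ≠ 'R' && (l : Int) ≤ p.1))
      = ((PySem.List.enumerate (cs.drop l) (l : Int)).filter (fun p => p.2 ≠ 'R')) := by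
    rw [zero_add]
    apply List.filter_congr
    intro p hp
    rcases (PySem.List.mem_enumerate_iff _ _ _).1 hp with ⟨k, hk, rfl⟩
    simp
  rw [h2]; simp

theorem Rrem_eq (cs : List Char) (r1 : Nat) (hr : r1 ≤ cs.length) :
    Rrem cs ((r1 : Int) - 1) =
      ((PySem.List.enumerate (cs.take r1) 0).filter (fun p => p.2 ≠ 'W')).map Prod.fst := by
  unfold Rrem
  conv_lhs => rw [← List.take_append_drop r1 cs]
  rw [PySem.List.enumerate_append, List.filter_append, List.map_append]
  have h2 : ((PySem.List.enumerate (cs.drop r1) (0 + ((cs.take r1).length:Int))).filter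
      (fun p => p.2 ≠ 'W' && p.1 ≤ (r1:Int) - 1)) = [] := by
    rw [List.filter_eq_nil_iff]
    intro p hp
    rcases (PySem.List.mem_enumerate_iff _ _ _).1 hp with ⟨k, hk, rfl⟩
    have : ((cs.take r1).length : Int) = (r1 : Int) := by
      simp [List.length_take, Nat.min_eq_left hr]
    simp [this]; intro _; omega
  rw [h2]
  have h1 : ((PySem.List.enumerate (cs.take r1) 0).filter (fun p => p.2 ≠ 'W' && p.1 ≤ (r1:Int) - 1))
      = ((PySem.List.enumerate (cs.take r1) 0).filter (fun p => p.2 ≠ 'W')) := by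
    apply List.filter_congr
    intro p hp
    rcases (PySem.List.mem_enumerate_iff _ _ _).1 hp with ⟨k, hk, rfl⟩
    have hkl : k < r1 := lt_of_lt_of_le hk (by simpa using List.length_take_le r1 cs)
    simp; intro _; omega
  rw [h1]; simp

theorem Lrem_skip (cs : List Char) (l : Nat) (hl : l < cs.length) (h : cs[l] = 'R') :
    Lrem cs (l : Int) = Lrem cs ((l : Int) + 1) := by
  have h1 := Lrem_eq cs l (le_of_lt hl)
  have h2 := Lrem_eq cs (l + 1) hl
  rw [List.drop_eq_getElem_cons hl, PySem.List.enumerate_cons] at h1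
  rw [h1]
  have : ((l : Int) + 1) = ((l + 1 : Nat) : Int) := by push_cast; ring
  rw [this, h2]
  simp [h]

theorem Lrem_cons (cs : List Char) (l : Nat) (hl : l < cs.length) (h : cs[l] ≠ 'R') :
    Lrem cs (l : Int) = (l : Int) :: Lrem cs ((l : Int) + 1) := by
  have h1 := Lrem_eq cs l (le_of_lt hl)
  have h2 := Lrem_eq cs (l + 1) hl
  rw [List.drop_eq_getElem_cons hl, PySem.List.enumerate_cons] at h1
  rw [h1]
  have hc : ((l : Int) + 1) = ((l + 1 : Nat) : Int) := by push_cast; ring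
  rw [hc, h2]
  simp [h]

theorem Rrem_drop (cs : List Char) (r : Nat) (hr : r < cs.length) (h : cs[r] = 'W') :
    Rrem cs (r : Int) = Rrem cs ((r : Int) - 1) := by
  have h1 := Rrem_eq cs (r + 1) hr
  have h2 := Rrem_eq cs r (le_of_lt hr)
  have hc : ((r : Int)) = ((r + 1 : Nat) : Int) - 1 := by push_cast; ring
  rw [hc, h1, List.take_succ, List.getElem?_eq_getElem hr]
  rw [PySem.List.enumerate_append, List.filter_append, List.map_append]
  have hlen : ((cs.take r).length : Int) = (r : Int) := by
    simp [List.length_take, Nat.min_eq_left (le_of_lt hr)]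
  simp only [ne_eq, decide_not] at h2
  simp [h, hlen]
  exact h2.symm

theorem Rrem_snoc (cs : List Char) (r : Nat) (hr : r < cs.length) (h : cs[r] ≠ 'W') :
    Rrem cs (r : Int) = Rrem cs ((r : Int) - 1) ++ [(r : Int)] := by
  have h1 := Rrem_eq cs (r + 1) hr
  have h2 := Rrem_eq cs r (le_of_lt hr)
  have hc : ((r : Int)) = ((r + 1 : Nat) : Int) - 1 := by push_cast; ring
  rw [hc, h1, List.take_succ, List.getElem?_eq_getElem hr]
  rw [PySem.List.enumerate_append, List.filter_append, List.map_append]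
  have hlen : ((cs.take r).length : Int) = (r : Int) := by
    simp [List.length_take, Nat.min_eq_left (le_of_lt hr)]
  simp only [ne_eq, decide_not] at h2
  simp [h, hlen]
  constructor
  · exact h2.symm
  · exact le_of_lt hr


theorem zc_rem_zero (cs : List Char) (l r : Int) (h : r ≤ l) :
    zc (Lrem cs l) ((Rrem cs r).reverse) = 0 := by
  apply zc_nil_of
  intro x hx y hy
  have h1 := mem_Lrem cs l x hx
  have h2 := mem_Rrem cs r y (List.mem_reverse.1 hy)
  omega

theorem loop_inv (S : String) (n : Nat) : ∀ (l r : Nat) (ans : Int), r + 1 - l ≤ n →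
    r < S.toList.length →
    solveLoop S (l : Int) (r : Int) ans =
      ans + (zc (Lrem S.toList (l : Int)) ((Rrem S.toList (r : Int)).reverse) : Int) := by
  induction n with
  | zero =>
    intro l r ans hb hr
    rw [solveLoop, if_neg (by exact_mod_cast (by omega : ¬ l < r))]
    rw [zc_rem_zero _ _ _ (by exact_mod_cast (by omega : r ≤ l))]
    simp
  | succ n ih =>
    intro l r ans hb hr
    by_cases hlr : l < r
    · have hln : l < S.toList.length := lt_trans hlr hr
      rw [solveLoop, if_pos (by exact_mod_cast hlr)]
      rw [PySem.Str.pyGet?_natCast S l, List.getElem?_eq_getElem hln]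
      rw [PySem.Str.pyGet?_natCast S r, List.getElem?_eq_getElem hr]
      have hc1 : (l : Int) + 1 = ((l + 1 : Nat) : Int) := by push_cast; ring
      have hc2 : (r : Int) - 1 = ((r - 1 : Nat) : Int) := by
        have : 1 ≤ r := by omega
        push_cast [this]; ring
      by_cases hR : S.toList[l] = 'R'
      · rw [if_pos (by rw [hR])]
        rw [hc1, ih (l + 1) r ans (by omega) hr, ← hc1, ← Lrem_skip _ l hln hR]
      · rw [if_neg (by simpa using hR)]
        by_cases hW : S.toList[r] = 'W'
        · rw [if_pos (by rw [hW])]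
          rw [hc2, ih l (r - 1) ans (by omega) (by omega), ← hc2, ← Rrem_drop _ r hr hW]
        · rw [if_neg (by simpa using hW)]
          rw [hc1, hc2, ih (l + 1) (r - 1) (ans + 1) (by omega) (by omega), ← hc1, ← hc2]
          rw [Lrem_cons _ l hln hR, Rrem_snoc _ r hr hW]
          rw [List.reverse_append]
          simp only [List.reverse_singleton, List.singleton_append]
          rw [zc_cons, if_pos (by exact_mod_cast hlr)]
          push_cast
          ring
    · rw [solveLoop, if_neg (by exact_mod_cast hlr)]
      rw [zc_rem_zero _ _ _ (by exact_mod_cast (by omega : r ≤ l))]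
      simp

theorem left_eq (cs : List Char) :
    Lrem cs 0 = ((PySem.List.enumerate cs 0).filter (fun p => p.2 ≠ 'R')).map Prod.fst := by
  unfold Lrem
  congr 1
  apply List.filter_congr
  intro p hp
  rcases (PySem.List.mem_enumerate_iff _ _ _).1 hp with ⟨k, hk, rfl⟩
  simp

theorem right_eq (cs : List Char) :
    Rrem cs ((cs.length : Int) - 1) = ((PySem.List.enumerate cs 0).filter (fun p => p.2 ≠ 'W')).map Prod.fst := by
  unfold Rrem
  congr 1
  apply List.filter_congr
  intro p hp
  rcases (PySem.List.mem_enumerate_iff _ _ _).1 hp with ⟨k, hk, rfl⟩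
  simp; omega



theorem final (N : Int) (S : String) : solve N S = solve_alt N S := by
  unfold solve solve_alt
  rw [PySem.Str.len_eq]
  cases hn : S.toList.length with
  | zero =>
    have hnil : S.toList = [] := List.length_eq_zero_iff.1 hn
    rw [solveLoop, if_neg (by omega)]
    simp [hnil, PySem.List.enumerate]
  | succ m =>
    have hc : ((m + 1 : Nat) : Int) - 1 = ((m : Nat) : Int) := by push_cast; ring
    rw [hc]
    have hinv := loop_inv S (m + 1) 0 m 0 (by omega) (by omega)
    rw [Nat.cast_zero] at hinv
    rw [hinv, left_eq, show ((m : Nat) : Int) = ((S.toList.length : Int) - 1) by rw [hn]; push_cast; ring, right_eq]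
    simp [zc]

-- ===== VERDICT (by name: the statement is the Claim_ definition above) =====
theorem solve_spec : Claim_equal_solve := by
  intro N S _
  unfold Spec_solve
  exact final N S
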